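-- pv_equiv track=rewrite | github.com/sebas112205/ejercicios-de-analisis | fuerza bruta/ejercicio2.py | ejercicio2
-- ===== SOURCE A (Python) =====
-- def ejercicio2(array:list[int])->int:
--     resultado1:list=[]
--     resultado:int=0
--     for i in range(len(array)-1):
--         pos1=array[i]
--         pos2=array[i+1]
--         if (pos1>0 and pos2>0):
--             suma=pos1+pos2
--             resultado1.append(suma)
--             for j in range(len(resultado1)-1):
--                 posj1=resultado1[j]
--                 posj2=resultado1[j+1]
--                 if posj1>posj2:
--                     return posj1
-- ===== SOURCE B (Python) =====
-- def ejercicio2(array: list[int]) -> int: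
--     prev = None
--     for a, b in zip(array, array[1:]):
--         if a > 0 and b > 0:
--             s = a + b
--             if prev is not None and prev > s:
--                 return prev
--             prev = s
--     return None
-- ===== Notes on version B (the rewrite author's own statement) =====
-- stated objective: faster
-- what changed: B keeps only the previous positive-pair sum and compares each new sum to it once, instead of A's rebuilding a list of sums and rescanning it from the start after every append.
import Mathlib
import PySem

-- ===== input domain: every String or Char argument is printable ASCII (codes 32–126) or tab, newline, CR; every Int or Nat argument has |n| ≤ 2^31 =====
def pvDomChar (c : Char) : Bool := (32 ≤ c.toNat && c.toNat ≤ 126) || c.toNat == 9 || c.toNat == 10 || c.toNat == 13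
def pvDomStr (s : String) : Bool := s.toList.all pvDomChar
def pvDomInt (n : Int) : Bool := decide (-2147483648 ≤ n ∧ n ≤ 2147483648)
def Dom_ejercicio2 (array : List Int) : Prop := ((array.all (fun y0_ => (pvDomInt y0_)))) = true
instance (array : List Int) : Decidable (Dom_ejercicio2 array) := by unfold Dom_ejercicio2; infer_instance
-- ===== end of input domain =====

-- B: single pass keeping only the previous positive-pair sum (A rescans its list of sums after every append).
-- ===== PORT A =====
-- inner loop: for j in range(len(resultado1)-1): if resultado1[j] > resultado1[j+1]: return resultado1[j]
def ejercicio2Scan : List Int → Option Int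
  | a :: b :: t => if a > b then some a else ejercicio2Scan (b :: t)
  | _ => none

-- outer loop over i in range(len(array)-1), walking adjacent pairs, with accumulator resultado1
def ejercicio2Loop : List Int → List Int → Option Int
  | a :: b :: t, r =>
    if a > 0 ∧ b > 0 then
      let r' := r ++ [a + b]
      match ejercicio2Scan r' with
      | some x => some x
      | none => ejercicio2Loop (b :: t) r'
    else ejercicio2Loop (b :: t) r
  | _, _ => none

def ejercicio2 (array : List Int) : Option Int := ejercicio2Loop array []

-- ===== PORT B =====
def ejercicio2AltLoop : List Int → Option Int → Option Int
  | a :: b :: t, prev =>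
    if a > 0 ∧ b > 0 then
      let s := a + b
      match prev with
      | some p => if p > s then some p else ejercicio2AltLoop (b :: t) (some s)
      | none => ejercicio2AltLoop (b :: t) (some s)
    else ejercicio2AltLoop (b :: t) prev
  | _, _ => none

def ejercicio2_alt (array : List Int) : Option Int := ejercicio2AltLoop array none

-- ===== PRECONDITION & SPEC =====
def Spec_ejercicio2 (array : List Int) (out : Option Int) : Prop := out = ejercicio2_alt array
instance (array : List Int) (out : Option Int) : Decidable (Spec_ejercicio2 array out) := by unfold Spec_ejercicio2; infer_instance

-- ===== CLAIM (what is proved, stated in full; the proofs are below) =====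
def Claim_equal_ejercicio2 : Prop := ∀ (array : List Int), Dom_ejercicio2 array → Spec_ejercicio2 array (ejercicio2 array)

-- ===== LEMMAS AND PROOFS =====

-- ===== VERDICT (by name: the statement is the Claim_ definition above) =====
-- if no adjacent decrease was found in r, appending s finds one iff last r > s
theorem scan_append (r : List Int) (s : Int) (h : ejercicio2Scan r = none) :
    ejercicio2Scan (r ++ [s]) =
      match r.getLast? with
      | some p => if p > s then some p else none
      | none => none := by
  induction r with
  | nil => simp [ejercicio2Scan]
  | cons a t ih =>
    cases t with
    | nil => simp [ejercicio2Scan]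
    | cons b u =>
      simp only [ejercicio2Scan] at h ⊢
      by_cases hab : a > b
      · simp [hab] at h
      · simp only [List.cons_append, ejercicio2Scan]
        rw [if_neg hab] at h ⊢
        have hih := ih h
        simp only [List.cons_append] at hih
        rw [hih]
        simp [List.getLast?_cons_cons]

theorem loop_eq (xs : List Int) : ∀ (r : List Int), ejercicio2Scan r = none →
    ejercicio2Loop xs r = ejercicio2AltLoop xs r.getLast? := by
  induction xs with
  | nil => intro r _; rfl
  | cons a t ih =>
    intro r hr
    cases t with
    | nil => rfl
    | cons b u =>
      simp only [ejercicio2Loop, ejercicio2AltLoop]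
      by_cases hpos : a > 0 ∧ b > 0
      · rw [if_pos hpos, if_pos hpos]
        rw [scan_append r (a + b) hr]
        cases hlast : r.getLast? with
        | none =>
          simp only
          rw [ih (r ++ [a + b]) (by rw [scan_append r (a + b) hr, hlast])]
          simp
        | some p =>
          by_cases hp : p > a + b
          · simp [hp]
          · simp only [hp, if_false]
            rw [ih (r ++ [a + b]) (by rw [scan_append r (a + b) hr, hlast]; simp [hp])]
            simp
      · rw [if_neg hpos, if_neg hpos]
        exact ih r hr

theorem ejercicio2_spec : Claim_equal_ejercicio2 := by
  intro array _
  unfold Spec_ejercicio2 ejercicio2 ejercicio2_alt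
  exact loop_eq array [] rfl
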